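-- pv_equiv track=rewrite | github.com/g24fitzgerald/PortlandState-Python | coursera/session_two/w1/is_digit.py | is_digit_v4
-- ===== SOURCE A (Python) =====
-- def is_digit_v4(s):
--     ''' (str) -> str
--
--     Returns the char in str that are digits
--
--     >>> is_digit_v4('12abf')
--     12
--     '''
--     indices = []
--     digits = ""
--
--     for i in range (len(s)):
--         if s[i].isdigit():
--             indices.append(i)
--     for index in indices:
--         digits = digits + s[index]
--     return digits
-- ===== SOURCE B (Python) =====
-- def is_digit_v4(s):
--     ''' (str) -> str
--
--     Returns the char in str that are digits
--     '''
--     return ''.join(c for c in s if c.isdigit())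
-- ===== Notes on version B (the rewrite author's own statement) =====
-- stated objective: simpler
-- what changed: B drops A's two-stage index-list construction and traversal and filters the digit characters of s directly in a single pass with ''.join.
import Mathlib
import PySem

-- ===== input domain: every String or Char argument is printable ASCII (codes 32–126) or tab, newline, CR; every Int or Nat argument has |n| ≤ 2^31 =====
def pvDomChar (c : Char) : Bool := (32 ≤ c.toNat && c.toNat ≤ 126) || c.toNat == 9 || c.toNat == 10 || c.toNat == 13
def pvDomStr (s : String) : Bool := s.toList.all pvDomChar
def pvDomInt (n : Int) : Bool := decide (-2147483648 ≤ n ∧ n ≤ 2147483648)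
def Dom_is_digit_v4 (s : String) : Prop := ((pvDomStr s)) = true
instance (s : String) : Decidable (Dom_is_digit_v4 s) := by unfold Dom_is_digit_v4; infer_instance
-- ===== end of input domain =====

-- B replaces A's two passes (collect digit indices, then re-index s) by one direct filter pass over the characters; objective: simpler.

-- ===== PORT A =====
-- first loop: collect the indices of digit positions; second loop: append s[index] for each collected index
def is_digit_v4 (s : String) : String :=
  String.ofList
    ((((PySem.List.pyRange 0 (PySem.Str.len s) 1).foldl
        (fun acc i =>
          if PySem.Chars.strIsdigit [PySem.List.pyGetD s.toList i ' '] then acc ++ [i] else acc) [])).foldl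
      (fun digits index => digits ++ [PySem.List.pyGetD s.toList index ' ']) [])

-- ===== PORT B =====
-- single pass: keep exactly the digit characters, in order
def is_digit_v4_alt (s : String) : String :=
  String.ofList (s.toList.filter (fun c => PySem.Chars.isdigit c))

-- ===== PRECONDITION & SPEC =====
def Spec_is_digit_v4 (s : String) (out : String) : Prop := out = is_digit_v4_alt s
instance (s : String) (out : String) : Decidable (Spec_is_digit_v4 s out) := by unfold Spec_is_digit_v4; infer_instance

-- ===== CLAIM (what is proved, stated in full; the proofs are below) =====
def Claim_equal_is_digit_v4 : Prop := ∀ (s : String), Dom_is_digit_v4 s → Spec_is_digit_v4 s (is_digit_v4 s)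

-- ===== LEMMAS AND PROOFS =====

-- the filtered index range, mapped back through indexing, is just the filtered list
theorem pv_key (cs : List Char) (p : Char → Bool) (d : Char) :
    ((List.range cs.length).filter (fun k => p (cs.getD k d))).map (fun k => cs.getD k d)
      = cs.filter p := by
  induction cs using List.reverseRecOn with
  | nil => simp
  | append_singleton xs c ih =>
    have hmem : ∀ k < xs.length, (xs ++ [c]).getD k d = xs.getD k d := by
      intro k hk
      rw [List.getD_eq_getElem _ _ (by simp; omega), List.getD_eq_getElem _ _ hk]
      exact List.getElem_append_left (by omega)
    have hlast : (xs ++ [c]).getD xs.length d = c := by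
      rw [List.getD_eq_getElem _ _ (by simp)]
      simp
    rw [List.length_append, List.length_singleton, List.range_succ,
        List.filter_append, List.map_append,
        List.filter_congr (fun k hk => by rw [hmem k (List.mem_range.mp hk)]),
        List.map_congr_left (fun k hk =>
          hmem k (List.mem_range.mp (List.mem_of_mem_filter hk))), ih]
    cases hp : p c
    · simp [hp]
    · simp [hp, hlast]

-- ===== VERDICT (by name: the statement is the Claim_ definition above) =====
theorem is_digit_v4_spec : Claim_equal_is_digit_v4 := by
  intro s _
  unfold Spec_is_digit_v4 is_digit_v4 is_digit_v4_alt
  rw [PySem.List.foldl_append_if, PySem.List.foldl_append_singleton_eq_map]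
  simp only [List.nil_append, PySem.Str.len_eq, PySem.List.pyRange_zero_natCast,
    List.filter_map, List.map_map, Function.comp_def, PySem.List.pyGetD_natCast]
  rw [pv_key s.toList (fun c => PySem.Chars.strIsdigit [c]) ' ']
  congr 1
  exact List.filter_congr (fun c _ => by simp [PySem.Chars.strIsdigit, PySem.Chars.isdigit])
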